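-- pv_equiv track=rewrite | github.com/AliRizaSevgili/Data-Structures-and-Algorithms-Python | Group Project-1/a1_partd.py | check_for_all_same_sign
-- ===== SOURCE A (Python) =====
-- def positive(self):
-- 	return self >= 0
--
-- def check_for_all_same_sign(grid):
-- 	for i in range(len(grid)):
-- 		for j in range(len(grid[i])):
-- 			if grid[i][j] != 0:
-- 				first_sign = positive(grid[i][j])
-- 				break
-- 	for i in range(len(grid)):
-- 		for j in range(len(grid[i])):
-- 			if grid[i][j] != 0 and positive(grid[i][j]) != first_sign:
-- 				return False
-- 	return True
-- ===== SOURCE B (Python) =====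
-- def positive(self):
--     return self >= 0
--
-- def check_for_all_same_sign(grid):
--     signs = set()
--     for row in grid:
--         for x in row:
--             if x != 0:
--                 signs.add(positive(x))
--     return len(signs) <= 1
-- ===== Notes on version B (the rewrite author's own statement) =====
-- stated objective: simpler
-- what changed: B replaces A's two full passes (find a reference sign, then re-scan comparing every nonzero entry against it) with one pass that accumulates the distinct signs of nonzero entries into a set and decides by its cardinality (<= 1).
import Mathlib
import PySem

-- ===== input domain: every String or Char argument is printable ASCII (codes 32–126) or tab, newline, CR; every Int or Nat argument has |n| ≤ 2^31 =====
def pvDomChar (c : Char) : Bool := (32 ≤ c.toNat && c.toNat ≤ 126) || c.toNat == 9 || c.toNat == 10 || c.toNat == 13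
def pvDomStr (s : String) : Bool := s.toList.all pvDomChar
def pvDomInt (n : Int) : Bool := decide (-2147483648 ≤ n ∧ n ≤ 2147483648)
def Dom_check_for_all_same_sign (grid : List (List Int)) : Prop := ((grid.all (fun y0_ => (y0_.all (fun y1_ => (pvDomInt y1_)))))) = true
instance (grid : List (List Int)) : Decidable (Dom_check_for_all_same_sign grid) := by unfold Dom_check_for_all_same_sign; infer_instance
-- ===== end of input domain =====

-- B does one pass collecting the distinct signs of nonzero entries into a set and tests its size,
-- instead of A's two passes (pick a reference sign, then compare everything against it).

-- positive(self): return self >= 0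
def positiveZ (x : Int) : Bool := decide (0 ≤ x)

-- ===== PORT A =====
-- first loop, inner part: scan a row, on the first nonzero set first_sign and break
def pvRowFirstSign (row : List Int) (fs : Option Bool) : Option Bool :=
  match row with
  | [] => fs
  | x :: r => if x ≠ 0 then some (positiveZ x) else pvRowFirstSign r fs

def check_for_all_same_sign (grid : List (List Int)) : Bool :=
  -- first nested loop: first_sign is unassigned (none) until a nonzero entry is seen
  let fs := grid.foldl (fun fs row => pvRowFirstSign row fs) none
  -- second nested loop with early return False
  grid.all (fun row => row.all (fun x => !(decide (x ≠ 0) && (some (positiveZ x) != fs))))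

-- ===== PORT B =====
def check_for_all_same_sign_alt (grid : List (List Int)) : Bool :=
  let signs : PySem.Set Bool :=
    grid.foldl (fun s row =>
      row.foldl (fun s x => if x ≠ 0 then PySem.Set.add s (positiveZ x) else s) s)
      PySem.Set.empty
  decide (PySem.Set.len signs ≤ 1)

-- ===== PRECONDITION & SPEC =====
def Spec_check_for_all_same_sign (grid : List (List Int)) (out : Bool) : Prop := out = check_for_all_same_sign_alt grid
instance (grid : List (List Int)) (out : Bool) : Decidable (Spec_check_for_all_same_sign grid out) := by unfold Spec_check_for_all_same_sign; infer_instance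

-- ===== CLAIM (what is proved, stated in full; the proofs are below) =====
def Claim_equal_check_for_all_same_sign : Prop := ∀ (grid : List (List Int)), Dom_check_for_all_same_sign grid → Spec_check_for_all_same_sign grid (check_for_all_same_sign grid)

-- ===== LEMMAS AND PROOFS =====

-- sign s appears among the nonzero entries of the grid
def HasSign (grid : List (List Int)) (s : Bool) : Prop :=
  ∃ row ∈ grid, ∃ x ∈ row, x ≠ 0 ∧ positiveZ x = s

theorem rowFirstSign_none {row : List Int} {fs : Option Bool}
    (h : pvRowFirstSign row fs = none) : fs = none ∧ ∀ x ∈ row, x = 0 := by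
  induction row with
  | nil => exact ⟨h, by simp⟩
  | cons x r ih =>
    by_cases hx : x = 0
    · simp [pvRowFirstSign, hx] at h
      obtain ⟨h1, h2⟩ := ih h
      refine ⟨h1, ?_⟩
      intro y hy
      rcases List.mem_cons.mp hy with hy | hy
      · exact hy ▸ hx
      · exact h2 y hy
    · simp [pvRowFirstSign, hx] at h

theorem rowFirstSign_some {row : List Int} {fs : Option Bool} {s : Bool}
    (h : pvRowFirstSign row fs = some s) :
    (∃ x ∈ row, x ≠ 0 ∧ positiveZ x = s) ∨ fs = some s := by
  induction row with
  | nil => exact Or.inr h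
  | cons x r ih =>
    by_cases hx : x = 0
    · simp [pvRowFirstSign, hx] at h
      rcases ih h with ⟨y, hy, hs⟩ | hfs
      · exact Or.inl ⟨y, List.mem_cons_of_mem _ hy, hs⟩
      · exact Or.inr hfs
    · simp [pvRowFirstSign, hx] at h
      exact Or.inl ⟨x, by simp, hx, h⟩

theorem foldFirstSign_none {grid : List (List Int)} {fs : Option Bool}
    (h : grid.foldl (fun fs row => pvRowFirstSign row fs) fs = none) :
    fs = none ∧ ∀ row ∈ grid, ∀ x ∈ row, x = 0 := by
  induction grid generalizing fs with
  | nil => exact ⟨h, by simp⟩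
  | cons row rest ih =>
    simp only [List.foldl_cons] at h
    obtain ⟨h1, h2⟩ := ih h
    obtain ⟨h3, h4⟩ := rowFirstSign_none h1
    refine ⟨h3, ?_⟩
    intro r hr
    rcases List.mem_cons.mp hr with hr | hr
    · exact hr ▸ h4
    · exact h2 r hr

theorem foldFirstSign_some {grid : List (List Int)} {fs : Option Bool} {s : Bool}
    (h : grid.foldl (fun fs row => pvRowFirstSign row fs) fs = some s) :
    HasSign grid s ∨ fs = some s := by
  induction grid generalizing fs with
  | nil => exact Or.inr h
  | cons row rest ih =>
    simp only [List.foldl_cons] at h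
    rcases ih h with hhs | hfs
    · obtain ⟨r, hr, hx⟩ := hhs
      exact Or.inl ⟨r, List.mem_cons_of_mem _ hr, hx⟩
    · rcases rowFirstSign_some hfs with ⟨x, hx, hnz, hsg⟩ | hfs'
      · exact Or.inl ⟨row, by simp, x, hx, hnz, hsg⟩
      · exact Or.inr hfs'

-- A returns true iff every nonzero entry's sign matches fs
theorem portA_true_iff (grid : List (List Int)) :
    check_for_all_same_sign grid = true ↔
      ∀ row ∈ grid, ∀ x ∈ row, x ≠ 0 →
        some (positiveZ x) = grid.foldl (fun fs row => pvRowFirstSign row fs) none := by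
  unfold check_for_all_same_sign
  simp [List.all_eq_true]
  constructor
  · intro h row hr x hx hnz
    rcases h row hr x hx with h0 | h0
    · exact absurd h0 hnz
    · exact h0
  · intro h row hr x hx
    by_cases hz : x = 0
    · exact Or.inl hz
    · exact Or.inr (h row hr x hx hz)

-- B's accumulator is a set whose members are exactly the signs that occur
theorem signsFold_spec (grid : List (List Int)) (s0 : PySem.Set Bool)
    (hnd : s0.Nodup) :
    let res := grid.foldl (fun s row =>
      row.foldl (fun s x => if x ≠ 0 then PySem.Set.add s (positiveZ x) else s) s) s0
    res.Nodup ∧ ∀ b : Bool, b ∈ res ↔ (b ∈ s0 ∨ HasSign grid b) := by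
  induction grid generalizing s0 with
  | nil => exact ⟨hnd, by simp [HasSign]⟩
  | cons row rest ih =>
    have hrow : ∀ (r : List Int) (t : PySem.Set Bool), t.Nodup →
        (r.foldl (fun s x => if x ≠ 0 then PySem.Set.add s (positiveZ x) else s) t).Nodup ∧
        ∀ b : Bool, b ∈ r.foldl (fun s x => if x ≠ 0 then PySem.Set.add s (positiveZ x) else s) t ↔
          (b ∈ t ∨ ∃ x ∈ r, x ≠ 0 ∧ positiveZ x = b) := by
      intro r
      induction r with
      | nil => intro t ht; exact ⟨ht, by simp⟩
      | cons x xs ihr =>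
        intro t ht
        by_cases hx : x = 0
        · simp only [List.foldl_cons]
          rw [if_neg (not_not_intro hx)]
          obtain ⟨h1, h2⟩ := ihr t ht
          refine ⟨h1, ?_⟩
          intro b
          rw [h2 b]
          constructor
          · rintro (h | ⟨y, hy, hr⟩)
            · exact Or.inl h
            · exact Or.inr ⟨y, by simp [hy], hr⟩
          · rintro (h | ⟨y, hy, hnz, hr⟩)
            · exact Or.inl h
            · rcases List.mem_cons.mp hy with hy | hy
              · exact absurd (hy ▸ hx) hnz
              · exact Or.inr ⟨y, hy, hnz, hr⟩
        · simp only [List.foldl_cons]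
          rw [if_pos hx]
          obtain ⟨h1, h2⟩ := ihr (PySem.Set.add t (positiveZ x)) (PySem.Set.nodup_add _ _ ht)
          refine ⟨h1, ?_⟩
          intro b
          rw [h2 b, PySem.Set.mem_add]
          constructor
          · rintro ((h | h) | ⟨y, hy, hnz, hr⟩)
            · exact Or.inl h
            · exact Or.inr ⟨x, by simp, hx, h.symm⟩
            · exact Or.inr ⟨y, by simp [hy], hnz, hr⟩
          · rintro (h | ⟨y, hy, hnz, hr⟩)
            · exact Or.inl (Or.inl h)
            · rcases List.mem_cons.mp hy with hy | hy
              · exact Or.inl (Or.inr (hy ▸ hr).symm)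
              · exact Or.inr ⟨y, hy, hnz, hr⟩
    simp only [List.foldl_cons]
    obtain ⟨h1, h2⟩ := hrow row s0 hnd
    obtain ⟨h3, h4⟩ := ih _ h1
    refine ⟨h3, ?_⟩
    intro b
    rw [h4 b, h2 b]
    unfold HasSign
    constructor
    · rintro ((h | ⟨y, hy, hr⟩) | ⟨r, hr, hx⟩)
      · exact Or.inl h
      · exact Or.inr ⟨row, by simp, y, hy, hr⟩
      · exact Or.inr ⟨r, by simp [hr], hx⟩
    · rintro (h | ⟨r, hr, hx⟩)
      · exact Or.inl (Or.inl h)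
      · rcases List.mem_cons.mp hr with hr | hr
        · exact Or.inl (Or.inr (hr ▸ hx))
        · exact Or.inr ⟨r, hr, hx⟩

-- a duplicate-free list of Bools has length ≤ 1 iff it does not contain both truth values
theorem bool_nodup_len {l : List Bool} (hnd : l.Nodup) :
    l.length ≤ 1 ↔ ¬ (true ∈ l ∧ false ∈ l) := by
  match l with
  | [] => simp
  | [a] => cases a <;> simp
  | a :: b :: t =>
    simp only [List.nodup_cons] at hnd
    have hab : a ≠ b := fun h => hnd.1 (h ▸ List.mem_cons_self ..)
    constructor
    · intro h; simp at h
    · intro h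
      exfalso
      cases a <;> cases b <;> simp_all

theorem portB_true_iff (grid : List (List Int)) :
    check_for_all_same_sign_alt grid = true ↔
      ¬ (HasSign grid true ∧ HasSign grid false) := by
  unfold check_for_all_same_sign_alt
  obtain ⟨hnd, hmem⟩ := signsFold_spec grid PySem.Set.empty (by simp [PySem.Set.empty])
  rw [decide_eq_true_iff]
  simp only [PySem.Set.len]
  have hc : ∀ L : List Bool, ((L.length : Int) ≤ 1 ↔ L.length ≤ 1) := by intro L; exact_mod_cast Iff.rfl
  rw [hc, bool_nodup_len hnd]
  have he : ∀ b : Bool, b ∈ grid.foldl (fun s row =>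
      row.foldl (fun s x => if x ≠ 0 then PySem.Set.add s (positiveZ x) else s) s)
      PySem.Set.empty ↔ HasSign grid b := by
    intro b; rw [hmem b]; simp [PySem.Set.empty]
  rw [he true, he false]

-- ===== VERDICT (by name: the statement is the Claim_ definition above) =====
theorem check_for_all_same_sign_spec : Claim_equal_check_for_all_same_sign := by
  intro grid _
  unfold Spec_check_for_all_same_sign
  have := portA_true_iff grid
  have hb := portB_true_iff grid
  rcases hfs : grid.foldl (fun fs row => pvRowFirstSign row fs) none with _ | s
  · -- all entries zero: both true
    obtain ⟨-, hz⟩ := foldFirstSign_none hfs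
    have ha : check_for_all_same_sign grid = true := by
      rw [this]; intro row hr x hx hnz; exact absurd (hz row hr x hx) hnz
    have hb' : check_for_all_same_sign_alt grid = true := by
      rw [hb]
      rintro ⟨⟨row, hr, x, hx, hnz, -⟩, -⟩
      exact hnz (hz row hr x hx)
    rw [ha, hb']
  · rcases foldFirstSign_some hfs with hhs | h
    · rw [hfs] at this
      have key : check_for_all_same_sign grid = true ↔ check_for_all_same_sign_alt grid = true := by
        rw [this, hb]
        obtain ⟨r0, hr0, x0, hx0, hnz0, hs0⟩ := hhs
        constructor
        · rintro hall ⟨⟨rp, hrp, xp, hxp, hnzp, hsp⟩, ⟨rn, hrn, xn, hxn, hnzn, hsn⟩⟩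
          have h1 := hall rp hrp xp hxp hnzp
          have h2 := hall rn hrn xn hxn hnzn
          rw [hsp] at h1; rw [hsn] at h2
          simp at h1 h2; simp_all
        · intro hnot row hr x hx hnz
          have : positiveZ x = s := by
            by_contra hne
            have hx' : positiveZ x = !s := by cases hxs : positiveZ x <;> cases s <;> simp_all
            have : HasSign grid s ∧ HasSign grid (!s) :=
              ⟨⟨r0, hr0, x0, hx0, hnz0, hs0⟩, ⟨row, hr, x, hx, hnz, hx'⟩⟩
            cases s
            · exact hnot ⟨this.2, this.1⟩
            · exact hnot ⟨this.1, this.2⟩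
          rw [this]
      cases hA : check_for_all_same_sign grid
      · cases hB : check_for_all_same_sign_alt grid
        · rfl
        · exact absurd (key.mpr hB) (by simp [hA])
      · exact (key.mp hA).symm
    · exact absurd h (by simp)
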